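-- pv_equiv track=rewrite | github.com/piannucci/blurt | blurt_py_80211/qam.py | grayRevToBinary
-- ===== SOURCE A (Python) =====
-- def grayRevToBinary(x, n):
--     y = 0*x
--     for i in range(n):
--         y <<= 1
--         y |= x&1
--         x >>= 1
--     shift = 1
--     while shift<n:
--         y ^= y >> shift
--         shift<<=1
--     return y
-- ===== SOURCE B (Python) =====
-- def grayRevToBinary(x, n):
--     # Iterative decomposition: walking widths w = 1..n (i.e. x's bits from
--     # highest-significant position downward), each set bit of x becomes the
--     # top bit of the partial result and complements the part decoded so far.
--     y = 0
--     for w in range(1, n + 1):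
--         if (x >> (n - w)) & 1:
--             h = 1 << (w - 1)
--             y = h + (h - 1 - y)
--     return y
-- ===== Notes on version B (the rewrite author's own statement) =====
-- stated objective: alternative
-- what changed: Replaced A's two passes (bit-reversal loop followed by a logarithmic xor-shift gray decode) by a single recursive decomposition: the low bit of x becomes the output's top bit and, when set, complements the recursively decoded rest.
import Mathlib
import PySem

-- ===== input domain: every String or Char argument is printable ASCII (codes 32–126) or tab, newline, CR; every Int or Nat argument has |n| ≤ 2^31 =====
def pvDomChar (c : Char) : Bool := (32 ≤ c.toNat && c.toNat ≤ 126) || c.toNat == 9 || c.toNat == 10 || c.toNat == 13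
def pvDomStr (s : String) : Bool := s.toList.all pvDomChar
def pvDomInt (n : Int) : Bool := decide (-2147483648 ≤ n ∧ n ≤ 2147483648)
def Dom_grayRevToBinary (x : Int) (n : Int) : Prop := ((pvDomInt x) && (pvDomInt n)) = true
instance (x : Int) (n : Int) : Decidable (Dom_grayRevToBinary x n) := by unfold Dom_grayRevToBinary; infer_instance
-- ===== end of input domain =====

-- B replaces A's two passes (reverse-n-bits loop, then logarithmic xor-shift gray decode) by one
-- recursive decomposition (low bit of x = top output bit, which, when set, complements the decoded
-- rest); equivalence of RETURN VALUES only (A also mutates a numpy array argument in place, which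
-- is outside the Int domain treated here).

-- ===== PORT A =====
-- A-side helper: the 'while shift < n: y ^= y >> shift; shift <<= 1' loop.
-- The '0 < shift' conjunct only makes the recursion total; it holds at every reachable call
-- (shift starts at 1 and doubles), so the loop body is exactly A's.
def pvGrayLoop (n y shift : Int) : Int :=
  if 0 < shift ∧ shift < n then
    pvGrayLoop n (PySem.Int.bxor y (y >>> shift.toNat)) (shift <<< (1:Nat))
  else y
termination_by (n - shift).toNat
decreasing_by
  simp only [Int.shiftLeft_eq, pow_one]
  omega

def grayRevToBinary (x : Int) (n : Int) : Int :=
  -- y = 0*x; for i in range(n): y <<= 1; y |= x&1; x >>= 1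
  let s := (PySem.List.pyRange 0 n 1).foldl
    (fun s _ => (PySem.Int.bor (s.1 <<< (1:Nat)) (PySem.Int.band s.2 1), s.2 >>> (1:Nat))) (0 * x, x)
  -- shift = 1; while shift < n: y ^= y >> shift; shift <<= 1
  pvGrayLoop n s.1 1

-- ===== PORT B =====
def grayRevToBinary_alt (x : Int) (n : Int) : Int :=
  -- y = 0; for w in range(1, n+1): if (x >> (n-w)) & 1: h = 1 << (w-1); y = h + (h-1-y)
  (PySem.List.pyRange 1 (n + 1)).foldl
    (fun y w =>
      if PySem.Int.band (x >>> (n - w).toNat) 1 ≠ 0 then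
        let h := (1 : Int) <<< (w - 1).toNat
        h + (h - 1 - y)
      else y) 0

-- ===== PRECONDITION & SPEC =====
def Spec_grayRevToBinary (x : Int) (n : Int) (out : Int) : Prop := out = grayRevToBinary_alt x n
instance (x : Int) (n : Int) (out : Int) : Decidable (Spec_grayRevToBinary x n out) := by unfold Spec_grayRevToBinary; infer_instance

-- ===== CLAIM (what is proved, stated in full; the proofs are below) =====
def Claim_equal_grayRevToBinary : Prop := ∀ (x : Int) (n : Int), Dom_grayRevToBinary x n → Spec_grayRevToBinary x n (grayRevToBinary x n)

-- ===== LEMMAS AND PROOFS =====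

-- proof-side recursive form of B's loop (width-w step = one loop iteration)
def pvAltRec (x : Int) (n : Int) : Int :=
  if n ≤ 0 then 0
  else
    let b := PySem.Int.band x 1
    let r := pvAltRec (x >>> (1:Nat)) (n - 1)
    if b ≠ 0 then
      let h := (1 : Int) <<< (n - 1).toNat
      h + (h - 1 - r)
    else r
termination_by n.toNat
decreasing_by omega


-- x & 1 is a bit
theorem pv_band01 (x : Int) : PySem.Int.band x 1 = 0 ∨ PySem.Int.band x 1 = 1 := by
  rw [PySem.Int.band_one]; exact PySem.Int.mod_two_eq x

theorem pv_shiftRight_zero (x : Int) : x >>> (0 : Nat) = x := by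
  rw [Int.shiftRight_eq_div_pow]; simp

theorem pv_shiftRight_add (x : Int) (a b : Nat) : x >>> a >>> b = x >>> (a + b) := by
  simp only [Int.shiftRight_eq_div_pow, pow_add]
  rw [Int.ediv_ediv_of_nonneg (by positivity : (0:Int) ≤ ((2^a : Nat) : Int))]
  push_cast; ring_nf

theorem pv_shiftRight_nonneg (x : Int) (k : Nat) (h : 0 ≤ x) : 0 ≤ x >>> k := by
  rw [Int.shiftRight_eq_div_pow]; exact Int.ediv_nonneg h (by positivity)

theorem pv_natCast_shiftRight (m k : Nat) : ((m : Int) >>> k) = ((m >>> k : Nat) : Int) := by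
  simp [Int.shiftRight_eq_div_pow, Nat.shiftRight_eq_div_pow]

-- 2*m | b = 2*m + b for a bit b
theorem pv_nat_lor_bit (m b : Nat) (hb : b ≤ 1) : 2 * m ||| b = 2 * m + b := by
  interval_cases b
  · simp
  · apply Nat.eq_of_testBit_eq
    intro i
    cases i with
    | zero =>
      rw [Nat.testBit_lor]
      simp only [Nat.testBit_zero]
      rw [show 2 * m % 2 = 0 by omega, show (2 * m + 1) % 2 = 1 by omega]
      decide
    | succ i =>
      rw [Nat.testBit_lor]
      simp only [Nat.testBit_succ]
      have h1 : 2 * m / 2 = m := by omega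
      have h2 : (2 * m + 1) / 2 = m := by omega
      have h3 : (1 : Nat) / 2 = 0 := by omega
      rw [h1, h2, h3]
      simp

theorem pv_bor_double_add (y b : Int) (hy : 0 ≤ y) (hb : b = 0 ∨ b = 1) :
    PySem.Int.bor (y <<< (1:Nat)) b = 2 * y + b := by
  have hs : y <<< (1:Nat) = 2 * y := by rw [Int.shiftLeft_eq]; ring
  rcases hb with hb | hb <;> subst hb
  · rw [PySem.Int.bor_zero, hs]; ring
  · rw [hs, PySem.Int.bor_of_nonneg (by omega) (by omega)]
    have h1 : (2 * y).toNat = 2 * y.toNat := by omega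
    have h2 : (1 : Int).toNat = 1 := rfl
    rw [h1, h2, pv_nat_lor_bit _ _ (le_refl 1)]
    push_cast; omega

-- the value built by A's first loop: the low k bits of x, reversed
def pvR : Int → Nat → Int
  | _, 0 => 0
  | x, k + 1 => PySem.Int.band x 1 * 2 ^ k + pvR (x >>> (1:Nat)) k

theorem pvR_bounds (k : Nat) : ∀ x : Int, 0 ≤ pvR x k ∧ pvR x k < 2 ^ k := by
  induction k with
  | zero => intro x; simp [pvR]
  | succ k ih =>
    intro x
    have h := ih (x >>> (1:Nat))
    have hb := pv_band01 x
    have hp : (0 : Int) < 2 ^ k := by positivity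
    simp only [pvR, pow_succ]
    rcases hb with hb | hb <;> rw [hb] <;> constructor <;> nlinarith [h.1, h.2, hp]

def pvStep (s : Int × Int) : Int × Int :=
  (PySem.Int.bor (s.1 <<< (1:Nat)) (PySem.Int.band s.2 1), s.2 >>> (1:Nat))

theorem pv_foldl_const (l : List Int) :
    ∀ s : Int × Int, l.foldl (fun s _ => pvStep s) s = pvStep^[l.length] s := by
  induction l with
  | nil => intro s; rfl
  | cons a l ih =>
    intro s
    simp only [List.foldl_cons, List.length_cons, Function.iterate_succ_apply, ih]

theorem pv_pyRange_len (k : Nat) : ∀ a b : Int, (b - a).toNat = k →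
    (PySem.List.pyRange a b).length = k := by
  induction k with
  | zero =>
    intro a b h
    have : b ≤ a := by omega
    simp [PySem.List.pyRange, this]
  | succ k ih =>
    intro a b h
    have hab : a < b := by omega
    rw [PySem.List.pyRange_one_cons hab, List.length_cons, ih (a + 1) b (by omega)]

theorem pv_iterate (k : Nat) : ∀ y x : Int, 0 ≤ y →
    pvStep^[k] (y, x) = (y * 2 ^ k + pvR x k, x >>> k) := by
  induction k with
  | zero => intro y x _; simp [pvR]
  | succ k ih =>
    intro y x hy
    have hb := pv_band01 x
    rw [Function.iterate_succ_apply]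
    have hstep : pvStep (y, x) = (2 * y + PySem.Int.band x 1, x >>> (1:Nat)) := by
      simp only [pvStep]
      rw [pv_bor_double_add y _ hy hb]
    rw [hstep, ih _ _ (by rcases hb with hb | hb <;> omega)]
    simp only [Prod.mk.injEq]
    constructor
    · simp only [pvR]; ring
    · rw [pv_shiftRight_add, Nat.add_comm]

-- the Nat mirror of pvGrayLoop (all values in it are nonnegative)
def pvGloop (n : Int) (a s : Nat) : Nat :=
  if 0 < s ∧ (s : Int) < n then pvGloop n (a ^^^ (a >>> s)) (s + s) else a
termination_by (n - s).toNat
decreasing_by push_cast; omega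

theorem pvGrayLoop_eq_gloop (n : Int) (k : Nat) : ∀ (y : Int) (s : Nat), (n - s).toNat ≤ k →
    0 ≤ y → 0 < s → pvGrayLoop n y (s : Int) = (pvGloop n y.toNat s : Int) := by
  induction k with
  | zero =>
    intro y s hk hy hs
    rw [pvGrayLoop.eq_def, pvGloop]
    have hns : ¬ (s : Int) < n := by omega
    simp [hns, hy]
  | succ k ih =>
    intro y s hk hy hs
    rw [pvGrayLoop.eq_def, pvGloop]
    by_cases hns : (s : Int) < n
    · have hpos : (0 : Int) < (s : Int) := by exact_mod_cast hs
      simp only [hpos, hns, hs, and_true, if_pos]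
      have hys : 0 ≤ y >>> s := pv_shiftRight_nonneg y s hy
      have hx : PySem.Int.bxor y (y >>> ((s : Int)).toNat) = ((y.toNat ^^^ y.toNat >>> s : Nat) : Int) := by
        have hts : ((s : Int)).toNat = s := by omega
        rw [hts, PySem.Int.bxor_of_nonneg hy hys]
        have h4 : (y >>> s).toNat = y.toNat >>> s := by
          have : y >>> s = ((y.toNat >>> s : Nat) : Int) := by
            conv_lhs => rw [show y = ((y.toNat : Nat) : Int) by omega]
            exact pv_natCast_shiftRight y.toNat s
          rw [this, Int.toNat_natCast]
        rw [h4]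
      have hsh : (s : Int) <<< (1:Nat) = (((s + s : Nat)) : Int) := by
        rw [Int.shiftLeft_eq]; push_cast; ring
      rw [hx, hsh, ih _ (s + s) (by omega) (by positivity) (by omega)]
      congr 1
    · simp [hns, hy]

-- xor of the s bits j, j+1, …, j+s-1 of a
def pvOfn (a j : Nat) : Nat → Bool
  | 0 => false
  | s + 1 => (a.testBit j).xor (pvOfn a (j + 1) s)

theorem pvOfn_split (a : Nat) (s : Nat) : ∀ j t, pvOfn a j (s + t) = (pvOfn a j s).xor (pvOfn a (j + s) t) := by
  induction s with
  | zero => intro j t; simp [pvOfn]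
  | succ s ih =>
    intro j t
    have h1 : s + 1 + t = (s + t) + 1 := by omega
    rw [h1]
    simp only [pvOfn]
    rw [ih (j + 1) t]
    have h2 : j + 1 + s = j + (s + 1) := by omega
    rw [h2, Bool.xor_assoc]

theorem pvOfn_high (a m : Nat) (ha : a < 2 ^ m) (s : Nat) : ∀ j, m ≤ j → pvOfn a j s = false := by
  induction s with
  | zero => intro j _; rfl
  | succ s ih =>
    intro j hj
    have : a.testBit j = false :=
      Nat.testBit_eq_false_of_lt (lt_of_lt_of_le ha (Nat.pow_le_pow_right (by omega) hj))
    simp [pvOfn, this, ih (j + 1) (by omega)]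

theorem pvOfn_stable (a m : Nat) (ha : a < 2 ^ m) (j s : Nat) (hs : m ≤ j + s) :
    pvOfn a j s = pvOfn a j (m - j) := by
  by_cases hj : m ≤ j
  · have h1 : m - j = 0 := by omega
    rw [h1, pvOfn_high a m ha s j hj]; rfl
  · have h1 : s = (m - j) + (s - (m - j)) := by omega
    rw [h1, pvOfn_split, pvOfn_high a m ha _ (j + (m - j)) (by omega), Bool.xor_false]

theorem pv_xor_shift_testBit (a s j : Nat) :
    (a ^^^ a >>> s).testBit j = (a.testBit j).xor (a.testBit (j + s)) := by
  rw [Nat.testBit_xor, Nat.testBit_shiftRight]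
  have : s + j = j + s := by omega
  rw [this]

theorem pvGloop_testBit (m : Nat) (k : Nat) : ∀ (a0 a s : Nat), (((m : Int)) - s).toNat ≤ k →
    a0 < 2 ^ m → 0 < s → (∀ j, a.testBit j = pvOfn a0 j s) →
    ∀ j, (pvGloop (m : Int) a s).testBit j = pvOfn a0 j (m - j) := by
  induction k with
  | zero =>
    intro a0 a s hk ha0 hs hinv j
    rw [pvGloop.eq_def]
    have hns : ¬ (s : Int) < (m : Int) := by omega
    simp only [hns, and_false, if_false]
    rw [hinv j]
    exact pvOfn_stable a0 m ha0 j s (by omega)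
  | succ k ih =>
    intro a0 a s hk ha0 hs hinv j
    rw [pvGloop.eq_def]
    by_cases hns : (s : Int) < (m : Int)
    · simp only [hs, hns, and_true, if_pos]
      refine ih a0 (a ^^^ a >>> s) (s + s) (by push_cast; omega) ha0 (by omega) ?_ j
      intro i
      rw [pv_xor_shift_testBit, hinv i, hinv (i + s)]
      have := pvOfn_split a0 s i s
      rw [this]
    · simp only [hns, and_false, if_false]
      rw [hinv j]
      exact pvOfn_stable a0 m ha0 j s (by omega)

-- bits of the reversed value: bit j of pvR x m is bit (m-1-j) of x
theorem pvR_testBit (m : Nat) : ∀ (x : Int) (j : Nat),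
    (pvR x m).toNat.testBit j = (decide (j < m) && (PySem.Int.band (x >>> (m - 1 - j)) 1 == 1)) := by
  induction m with
  | zero => intro x j; simp [pvR]
  | succ m ih =>
    intro x j
    have hb := pv_band01 x
    have hr := pvR_bounds m (x >>> (1:Nat))
    have hpow : ((2 ^ m : Nat) : Int) = (2 : Int) ^ m := by push_cast; ring
    rcases hb with hb | hb
    · have hv : (pvR x (m + 1)).toNat = (pvR (x >>> (1:Nat)) m).toNat := by
        simp only [pvR, hb]; omega
      rw [hv]
      rcases lt_trichotomy j m with hj | hj | hj
      · rw [ih (x >>> (1:Nat)) j]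
        have h1 : m - 1 - j + 1 = m + 1 - 1 - j := by omega
        rw [show x >>> (1:Nat) >>> (m - 1 - j) = x >>> (1 + (m - 1 - j)) from pv_shiftRight_add x 1 _,
            show 1 + (m - 1 - j) = m + 1 - 1 - j by omega]
        simp [hj, Nat.lt_succ_of_lt hj]
      · subst hj
        have hlt : (pvR (x >>> (1:Nat)) j).toNat < 2 ^ j := by omega
        rw [Nat.testBit_eq_false_of_lt hlt]
        have : x >>> (j + 1 - 1 - j) = x := by
          rw [show j + 1 - 1 - j = 0 by omega]; exact pv_shiftRight_zero x
        rw [this]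
        simp [hb]
      · have hlt : (pvR (x >>> (1:Nat)) m).toNat < 2 ^ j := by
          have := Nat.pow_le_pow_right (show 1 ≤ 2 by omega) (show m ≤ j by omega)
          omega
        rw [Nat.testBit_eq_false_of_lt hlt]
        simp [show ¬ (j < m + 1) by omega]
    · have hv : (pvR x (m + 1)).toNat = 2 ^ m + (pvR (x >>> (1:Nat)) m).toNat := by
        simp only [pvR, hb]; omega
      rw [hv]
      rcases lt_trichotomy j m with hj | hj | hj
      · rw [Nat.testBit_two_pow_add_gt hj, ih (x >>> (1:Nat)) j]
        rw [show x >>> (1:Nat) >>> (m - 1 - j) = x >>> (1 + (m - 1 - j)) from pv_shiftRight_add x 1 _,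
            show 1 + (m - 1 - j) = m + 1 - 1 - j by omega]
        simp [hj, Nat.lt_succ_of_lt hj]
      · subst hj
        rw [Nat.testBit_two_pow_add_eq]
        have hlt : (pvR (x >>> (1:Nat)) j).toNat < 2 ^ j := by omega
        rw [Nat.testBit_eq_false_of_lt hlt]
        have : x >>> (j + 1 - 1 - j) = x := by
          rw [show j + 1 - 1 - j = 0 by omega]; exact pv_shiftRight_zero x
        rw [this]
        simp [hb]
      · have hlt : 2 ^ m + (pvR (x >>> (1:Nat)) m).toNat < 2 ^ j := by
          have h1 : 2 ^ (m + 1) ≤ 2 ^ j := Nat.pow_le_pow_right (by omega) (by omega)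
          have h2 : 2 ^ (m + 1) = 2 ^ m + 2 ^ m := by ring
          omega
        rw [Nat.testBit_eq_false_of_lt hlt]
        simp [show ¬ (j < m + 1) by omega]

-- xor of the s bits lo, lo+1, …, lo+s-1 of x
def pvSeg (x : Int) (lo : Nat) : Nat → Bool
  | 0 => false
  | s + 1 => ((PySem.Int.band (x >>> lo) 1) == 1).xor (pvSeg x (lo + 1) s)

theorem pvSeg_snoc (s : Nat) : ∀ (x : Int) (lo : Nat),
    pvSeg x lo (s + 1) = (pvSeg x lo s).xor ((PySem.Int.band (x >>> (lo + s)) 1) == 1) := by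
  induction s with
  | zero => intro x lo; simp [pvSeg]
  | succ s ih =>
    intro x lo
    show ((PySem.Int.band (x >>> lo) 1) == 1).xor (pvSeg x (lo + 1) (s + 1)) = _
    rw [ih x (lo + 1), show lo + 1 + s = lo + (s + 1) by omega]
    simp only [pvSeg]
    rw [Bool.xor_assoc]

theorem pvSeg_shift (s : Nat) : ∀ (x : Int) (lo : Nat), pvSeg x (lo + 1) s = pvSeg (x >>> (1:Nat)) lo s := by
  induction s with
  | zero => intro x lo; rfl
  | succ s ih =>
    intro x lo
    simp only [pvSeg]
    rw [ih x (lo + 1), show x >>> (lo + 1) = x >>> (1:Nat) >>> lo by rw [pv_shiftRight_add, Nat.add_comm]]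

-- bits of B's value: bit j of (alt x n) is the xor of bits 0 … n-1-j of x
theorem pv_alt_bounds (x n : Int) : 0 ≤ pvAltRec x n ∧ pvAltRec x n < 2 ^ n.toNat := by
  fun_induction pvAltRec x n with
  | case1 x n h => simp
  | case2 x n hn b r hbne h ih =>
    have hh : ((1 : Int) <<< (n - 1).toNat) = 2 ^ (n - 1).toNat := by rw [Int.shiftLeft_eq]; ring
    have hpow : (2 : Int) ^ n.toNat = 2 * 2 ^ (n - 1).toNat := by
      rw [show n.toNat = (n - 1).toNat + 1 by omega]; ring
    show 0 ≤ (1 : Int) <<< (n - 1).toNat + ((1 : Int) <<< (n - 1).toNat - 1 - pvAltRec (x >>> (1:Nat)) (n - 1)) ∧ _ < 2 ^ n.toNat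
    rw [hh, hpow]
    constructor <;> nlinarith [ih.1, ih.2]
  | case3 x n hn b r hbz ih =>
    refine ⟨ih.1, lt_of_lt_of_le ih.2 ?_⟩
    exact pow_le_pow_right₀ (by omega) (by omega)

theorem pv_alt_testBit (m : Nat) : ∀ (x : Int) (j : Nat),
    (pvAltRec x (m : Int)).toNat.testBit j = (decide (j < m) && pvSeg x 0 (m - j)) := by
  induction m with
  | zero => intro x j; rw [pvAltRec.eq_def]; simp
  | succ m ih =>
    intro x j
    rw [pvAltRec.eq_def]
    have hm : ¬ ((m + 1 : Nat) : Int) ≤ 0 := by push_cast; omega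
    simp only [hm, if_false]
    have harg : ((m + 1 : Nat) : Int) - 1 = (m : Int) := by push_cast; ring
    have hb := pv_band01 x
    have hr := pv_alt_bounds (x >>> (1:Nat)) (m : Int)
    have hrN : (pvAltRec (x >>> (1:Nat)) (m : Int)).toNat < 2 ^ m := by
      have h2 : ((2 ^ m : Nat) : Int) = (2 : Int) ^ m := by push_cast; ring
      have := hr.2
      rw [show ((m : Int)).toNat = m by omega] at this
      omega
    rcases hb with hb | hb
    · simp only [harg, hb, ne_eq, not_true_eq_false, if_neg, not_false_eq_true]
      rcases lt_trichotomy j m with hj | hj | hj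
      · rw [ih (x >>> (1:Nat)) j, show m + 1 - j = (m - j) + 1 by omega]
        simp only [pvSeg]
        rw [pv_shiftRight_zero, hb, pvSeg_shift (m - j) x 0]
        simp [hj, Nat.lt_succ_of_lt hj]
      · subst hj
        rw [Nat.testBit_eq_false_of_lt hrN, show j + 1 - j = 1 by omega]
        simp only [pvSeg]
        rw [pv_shiftRight_zero, hb]
        simp
      · rw [Nat.testBit_eq_false_of_lt (lt_of_lt_of_le hrN (Nat.pow_le_pow_right (by omega) (by omega)))]
        simp [show ¬ (j < m + 1) by omega]
    · simp only [harg, hb, ne_eq, one_ne_zero, not_false_eq_true, if_pos]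
      have hh : (1 : Int) <<< (((m : Int))).toNat = 2 ^ m := by
        rw [Int.shiftLeft_eq, show (((m : Int))).toNat = m by omega]; ring
      rw [hh]
      set r := pvAltRec (x >>> (1:Nat)) (m : Int) with hrdef
      have h2 : ((2 ^ m : Nat) : Int) = (2 : Int) ^ m := by push_cast; ring
      have hv : ((2 : Int) ^ m + ((2 : Int) ^ m - 1 - r)).toNat = 2 ^ m + (2 ^ m - 1 - r.toNat) := by
        have := hr.1
        omega
      rw [hv]
      have hc : 2 ^ m - 1 - r.toNat < 2 ^ m := by
        have : (0 : Nat) < 2 ^ m := by positivity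
        omega
      rcases lt_trichotomy j m with hj | hj | hj
      · rw [Nat.testBit_two_pow_add_gt hj]
        have hcompl : (2 ^ m - 1 - r.toNat).testBit j = !(r.toNat.testBit j) := by
          rw [show 2 ^ m - 1 - r.toNat = 2 ^ m - (r.toNat + 1) by omega,
              Nat.testBit_two_pow_sub_succ hrN]
          simp [hj]
        rw [hcompl, hrdef, ih (x >>> (1:Nat)) j, show m + 1 - j = (m - j) + 1 by omega]
        simp only [pvSeg]
        rw [pv_shiftRight_zero, hb, pvSeg_shift (m - j) x 0]
        simp [hj, Nat.lt_succ_of_lt hj]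
      · subst hj
        rw [Nat.testBit_two_pow_add_eq, Nat.testBit_eq_false_of_lt hc, show j + 1 - j = 1 by omega]
        simp only [pvSeg]
        rw [pv_shiftRight_zero, hb]
        simp
      · have hlt : 2 ^ m + (2 ^ m - 1 - r.toNat) < 2 ^ j := by
          have h1 : 2 ^ (m + 1) ≤ 2 ^ j := Nat.pow_le_pow_right (by omega) (by omega)
          have h3 : 2 ^ (m + 1) = 2 ^ m + 2 ^ m := by ring
          omega
        rw [Nat.testBit_eq_false_of_lt hlt]
        simp [show ¬ (j < m + 1) by omega]

-- the reversed value's prefix xors are x's suffix xors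
theorem pv_ofn_seg (m : Nat) (x : Int) (s : Nat) : ∀ j, j + s ≤ m →
    pvOfn (pvR x m).toNat j s = pvSeg x (m - j - s) s := by
  induction s with
  | zero => intro j _; rfl
  | succ s ih =>
    intro j hjs
    show ((pvR x m).toNat.testBit j).xor (pvOfn (pvR x m).toNat (j + 1) s) = _
    rw [pvR_testBit m x j, ih (j + 1) (by omega), pvSeg_snoc]
    have hj : j < m := by omega
    have h1 : m - (j + 1) - s = m - j - (s + 1) := by omega
    have h2 : m - j - (s + 1) + s = m - 1 - j := by omega
    rw [h1, h2]
    simp only [hj, decide_true, Bool.true_and]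
    rw [Bool.xor_comm]


-- B's fold equals its recursive form
theorem pv_alt_eq_rec (m : Nat) : ∀ (n : Int), n.toNat = m → ∀ x, grayRevToBinary_alt x n = pvAltRec x n := by
  induction m with
  | zero =>
    intro n hn x
    rw [grayRevToBinary_alt.eq_def, pvAltRec.eq_def]
    have h0 : n + 1 ≤ 1 := by omega
    have hnil : PySem.List.pyRange 1 (n + 1) = [] := by simp [PySem.List.pyRange]; omega
    simp [hnil, show n ≤ 0 by omega]
  | succ m ih =>
    intro n hn x
    have hn1 : 1 ≤ n := by omega
    rw [grayRevToBinary_alt.eq_def, pvAltRec.eq_def]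
    simp only [show ¬ n ≤ 0 by omega, if_false]
    rw [PySem.List.pyRange_one_append 1 n (n + 1) (by omega) (by omega),
        PySem.List.pyRange_one_cons (by omega : n < n + 1),
        show PySem.List.pyRange (n + 1) (n + 1) = [] by simp [PySem.List.pyRange]]
    rw [List.foldl_append]
    have hcongr : (PySem.List.pyRange 1 n).foldl
        (fun y w =>
          if PySem.Int.band (x >>> (n - w).toNat) 1 ≠ 0 then
            let h := (1 : Int) <<< (w - 1).toNat
            h + (h - 1 - y)
          else y) 0
        = grayRevToBinary_alt (x >>> (1:Nat)) (n - 1) := by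
      rw [grayRevToBinary_alt.eq_def]
      rw [show n - 1 + 1 = n by ring]
      apply PySem.List.foldl_congr_mem
      intro acc w hw
      rw [PySem.List.mem_pyRange_one] at hw
      have harg : x >>> (1:Nat) >>> (n - 1 - w).toNat = x >>> (n - w).toNat := by
        rw [pv_shiftRight_add, show 1 + (n - 1 - w).toNat = (n - w).toNat by omega]
      rw [harg]
    rw [hcongr, ih (n - 1) (by omega) (x >>> (1:Nat))]
    simp only [List.foldl_cons, List.foldl_nil]
    rw [show n - n = 0 by ring]
    simp

-- main equivalence
theorem pv_main (x n : Int) : grayRevToBinary x n = grayRevToBinary_alt x n := by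
  rw [pv_alt_eq_rec n.toNat n rfl x]
  by_cases hn : n ≤ 0
  · rw [pvAltRec.eq_def]
    simp only [hn, if_pos]
    show pvGrayLoop n (((PySem.List.pyRange 0 n 1).foldl _ (0 * x, x)).1) 1 = 0
    have hnil : PySem.List.pyRange 0 n 1 = [] := by simp [PySem.List.pyRange]; omega
    rw [hnil]
    rw [pvGrayLoop.eq_def]
    have : ¬ ((1 : Int) < n) := by omega
    simp [this]
  · -- n ≥ 1
    have hm : n = ((n.toNat : Nat) : Int) := by omega
    set m := n.toNat with hmdef
    have hm1 : 1 ≤ m := by omega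
    -- first loop
    have hlen : (PySem.List.pyRange 0 n 1).length = m := pv_pyRange_len m 0 n (by omega)
    have hfold : ((PySem.List.pyRange 0 n 1).foldl
        (fun s _ => (PySem.Int.bor (s.1 <<< (1:Nat)) (PySem.Int.band s.2 1), s.2 >>> (1:Nat))) (0 * x, x)).1
        = pvR x m := by
      have : (fun (s : Int × Int) (_ : Int) => (PySem.Int.bor (s.1 <<< (1:Nat)) (PySem.Int.band s.2 1), s.2 >>> (1:Nat)))
           = (fun s _ => pvStep s) := rfl
      rw [this, pv_foldl_const, hlen, pv_iterate m (0 * x) x (by simp)]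
      simp
    show pvGrayLoop n _ 1 = _
    rw [hfold]
    have hrb := pvR_bounds m x
    have hr0 : 0 ≤ pvR x m := hrb.1
    have hrN : (pvR x m).toNat < 2 ^ m := by
      have h2 : ((2 ^ m : Nat) : Int) = (2 : Int) ^ m := by push_cast; ring
      omega
    have hgl : pvGrayLoop n (pvR x m) ((1 : Nat) : Int) = (pvGloop n (pvR x m).toNat 1 : Int) :=
      pvGrayLoop_eq_gloop n (n - 1).toNat (pvR x m) 1 (by omega) hr0 (by omega)
    rw [show ((1:Nat) : Int) = (1 : Int) by rfl] at hgl
    rw [hgl, hm]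
    have hbits : ∀ j, (pvGloop ((m : Nat) : Int) (pvR x m).toNat 1).testBit j
        = (pvAltRec x ((m : Nat) : Int)).toNat.testBit j := by
      intro j
      have hg := pvGloop_testBit m ((m : Int) - 1).toNat (pvR x m).toNat (pvR x m).toNat 1
        (by omega) hrN (by omega) (fun j => by simp [pvOfn]) j
      rw [hg, pv_alt_testBit m x j]
      by_cases hj : j < m
      · rw [pv_ofn_seg m x (m - j) j (by omega)]
        rw [show m - j - (m - j) = 0 by omega]
        simp [hj]
      · rw [show m - j = 0 by omega]
        simp [hj, pvOfn]
    have heq : pvGloop ((m : Nat) : Int) (pvR x m).toNat 1 = (pvAltRec x ((m : Nat) : Int)).toNat :=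
      Nat.eq_of_testBit_eq hbits
    rw [heq]
    have halt := (pv_alt_bounds x ((m : Nat) : Int)).1
    omega

-- ===== VERDICT (by name: the statement is the Claim_ definition above) =====
theorem grayRevToBinary_spec : Claim_equal_grayRevToBinary := by
  intro x n _
  unfold Spec_grayRevToBinary
  exact pv_main x n
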